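-- pv_equiv track=rewrite | github.com/akshaykamble139/CodeForcesProblems | 900 rating/make_it_divisible_by_25.py | result
-- ===== SOURCE A (Python) =====
-- def result(a, b):
--     l = len(a)-1
--     ans = 0
--     while l >= 0 and a[l] != b[1]:
--         l -= 1
--         ans += 1
--
--     if l<0:
--         return 100
--     l -= 1
--     while l>=0 and a[l] != b[0]:
--         l -= 1
--         ans += 1
--
--     if l<0:
--         return 100
--     return ans
-- ===== SOURCE B (Python) =====
-- def result(a, b):
--     # Single forward pass: track the last position of b[0] seen so far, and the
--     # best (rightmost) position of b[0] known to have a b[1] somewhere after it.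
--     last0 = -1
--     best = -1
--     for i, ch in enumerate(a):
--         if ch == b[1] and last0 > best:
--             best = last0
--         if ch == b[0]:
--             last0 = i
--     return 100 if best == -1 else len(a) - 2 - best
-- ===== Notes on version B (the rewrite author's own statement) =====
-- stated objective: alternative
-- what changed: Replaces A's two backward character scans with per-step deletion counters by one forward pass maintaining two indices (last occurrence of b[0], best b[0] position with a b[1] after it) and the closed form len(a)-2-best.
import Mathlib
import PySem

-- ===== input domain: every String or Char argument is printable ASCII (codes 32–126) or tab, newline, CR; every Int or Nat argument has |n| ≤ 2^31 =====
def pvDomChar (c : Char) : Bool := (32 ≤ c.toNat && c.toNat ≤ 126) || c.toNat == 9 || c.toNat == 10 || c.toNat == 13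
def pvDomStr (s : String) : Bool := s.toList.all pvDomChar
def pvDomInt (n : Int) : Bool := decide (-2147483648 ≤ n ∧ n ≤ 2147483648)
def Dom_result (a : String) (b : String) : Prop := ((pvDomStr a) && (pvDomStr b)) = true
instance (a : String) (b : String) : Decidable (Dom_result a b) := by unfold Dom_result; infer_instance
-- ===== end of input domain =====

-- B replaces A's two backward counting scans by ONE forward pass keeping two indices
-- (last b[0] seen, best b[0] position with a b[1] after it) and the closed form
-- len(a)-2-best; objective: alternative (same O(n) cost, different traversal).

-- ===== PORT A =====
-- the backward loop 'while l >= 0 and a[l] != <target>: l -= 1; ans += 1', returning (l, ans)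
def scanBackA (cs : List Char) (t : Option Char) (l : Int) (ans : Int) : Int × Int :=
  if 0 ≤ l ∧ PySem.List.pyGet? cs l ≠ t then
    scanBackA cs t (l - 1) (ans + 1)
  else (l, ans)
termination_by (l + 1).toNat
decreasing_by omega

def result (a : String) (b : String) : Int :=
  let cs := a.toList
  let s1 := scanBackA cs (PySem.Str.pyGet? b 1) ((cs.length : Int) - 1) 0
  if s1.1 < 0 then 100
  else
    let s2 := scanBackA cs (PySem.Str.pyGet? b 0) (s1.1 - 1) s1.2
    if s2.1 < 0 then 100 else s2.2

-- ===== PORT B =====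
-- the body of B's single forward loop over enumerate(a)
def stepB (b : String) (st : Int × Int) (p : Int × Char) : Int × Int :=
  let best := if PySem.Str.pyGet? b 1 = some p.2 ∧ st.1 > st.2 then st.1 else st.2
  let last0 := if PySem.Str.pyGet? b 0 = some p.2 then p.1 else st.1
  (last0, best)

def result_alt (a : String) (b : String) : Int :=
  let st := (PySem.List.enumerate a.toList 0).foldl (stepB b) (-1, -1)
  if st.2 = -1 then 100 else PySem.Str.len a - 2 - st.2

-- ===== PRECONDITION & SPEC =====
-- Pre_ excludes inputs with a ≠ "" and len(b) < 2: there Python A's loop condition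
-- indexes b[1] and raises IndexError (B raises there too); it admits every input on
-- which A returns (len(b) ≥ 2, or a = "" where A returns 100 without touching b).
def Pre_result (a : String) (b : String) : Prop := a = "" ∨ 2 ≤ b.length
instance (a : String) (b : String) : Decidable (Pre_result a b) := by unfold Pre_result; infer_instance
def pvWitness_result : String × String := ("1025", "25")

def Spec_result (a : String) (b : String) (out : Int) : Prop := out = result_alt a b
instance (a : String) (b : String) (out : Int) : Decidable (Spec_result a b out) := by unfold Spec_result; infer_instance

-- ===== CLAIM (what is proved, stated in full; the proofs are below) =====
def Claim_equal_result : Prop := ∀ (a : String) (b : String), Dom_result a b → Pre_result a b → Spec_result a b (result a b)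

-- ===== LEMMAS AND PROOFS =====

-- one-char prefix test
theorem isPrefixOf_singleton (c : Char) (xs : List Char) :
    [c].isPrefixOf xs = match xs with | [] => false | y :: _ => (c == y) := by
  cases xs <;> simp [List.isPrefixOf]

theorem rfind_nil (c : Char) : PySem.Chars.rfind [] [c] = -1 := by
  simp [PySem.Chars.rfind, PySem.Chars.rfind.go, List.isPrefixOf]

-- rfind.go below the appended element agrees with go on the shorter list
theorem rfind_go_snoc_lt (xs : List Char) (x c : Char) :
    ∀ j, j < xs.length →
      PySem.Chars.rfind.go (xs ++ [x]) [c] j = PySem.Chars.rfind.go xs [c] j := by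
  intro j
  induction j with
  | zero =>
    intro h
    cases xs with
    | nil => simp at h
    | cons y ys => simp [PySem.Chars.rfind.go, List.isPrefixOf]
  | succ j ih =>
    intro h
    have hdrop : (xs ++ [x]).drop (j + 1) = xs.drop (j + 1) ++ [x] := by
      rw [List.drop_append_of_le_length (by omega)]
    have hne : xs.drop (j + 1) ≠ [] := by
      intro hnil
      have := List.drop_eq_nil_iff.mp hnil
      omega
    obtain ⟨y, ys, hy⟩ := List.exists_cons_of_ne_nil hne
    simp only [PySem.Chars.rfind.go, hdrop, hy, List.cons_append,
      isPrefixOf_singleton, ih (by omega)]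

-- last occurrence after appending one element
theorem rfind_snoc (xs : List Char) (x c : Char) :
    PySem.Chars.rfind (xs ++ [x]) [c] =
      if x = c then (xs.length : Int) else PySem.Chars.rfind xs [c] := by
  unfold PySem.Chars.rfind
  have hlen : (xs ++ [x]).length = xs.length + 1 := by simp
  rw [hlen]
  cases xs with
  | nil =>
    by_cases h : x = c
    · subst h
      simp [PySem.Chars.rfind.go, List.isPrefixOf]
    · have hc : (c == x) = false := by
        simp; exact fun hcx => h hcx.symm
      simp [PySem.Chars.rfind.go, List.isPrefixOf, hc, h]
  | cons y ys =>
    have hL : (y :: ys).length = ys.length + 1 := by simp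
    rw [hL]
    show PySem.Chars.rfind.go ((y :: ys) ++ [x]) [c] (ys.length + 1 + 1) = _
    have step1 : PySem.Chars.rfind.go ((y :: ys) ++ [x]) [c] (ys.length + 1 + 1)
        = PySem.Chars.rfind.go ((y :: ys) ++ [x]) [c] (ys.length + 1) := by
      simp only [PySem.Chars.rfind.go]
      rw [show ys.length + 1 + 1 = ((y :: ys) ++ [x]).length by simp]
      simp [List.isPrefixOf]
    rw [step1]
    have hdropL : ((y :: ys) ++ [x]).drop (ys.length + 1) = [x] := by
      rw [List.drop_append_of_le_length (by simp)]
      simp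
    simp only [PySem.Chars.rfind.go, hdropL, isPrefixOf_singleton]
    by_cases hx : x = c
    · subst hx; simp
    · have : (c == x) = false := by
        simp; intro hc; exact hx hc.symm
      simp only [this, if_neg hx, Bool.false_eq_true, if_false]
      have := rfind_go_snoc_lt (y :: ys) x c (ys.length) (by simp)
      rw [List.cons_append] at this ⊢
      rw [this]
      have hd : List.drop (ys.length + 1) (y :: ys) = [] := by
        apply List.drop_eq_nil_of_le; simp
      simp [hd]

theorem rfind_singleton (x c : Char) :
    PySem.Chars.rfind [x] [c] = if x = c then 0 else -1 := by
  by_cases h : x = c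
  · subst h; simp [PySem.Chars.rfind, PySem.Chars.rfind.go, List.isPrefixOf]
  · have hc : (c == x) = false := by simp; exact fun hcx => h hcx.symm
    simp [PySem.Chars.rfind, PySem.Chars.rfind.go, List.isPrefixOf, hc, h]

-- -1 ≤ rfind xs [c] < xs.length
theorem rfind_bounds (xs : List Char) (c : Char) :
    -1 ≤ PySem.Chars.rfind xs [c] ∧ PySem.Chars.rfind xs [c] < (xs.length : Int) := by
  induction xs using List.reverseRecOn with
  | nil => simp [rfind_nil]
  | append_singleton ys y ih =>
    rw [rfind_snoc]
    by_cases h : y = c <;> simp [h] <;> omega -- keep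

-- rfind only grows when the list is extended on the right
theorem rfind_append_le (xs ys : List Char) (c : Char) :
    PySem.Chars.rfind xs [c] ≤ PySem.Chars.rfind (xs ++ ys) [c] := by
  induction ys using List.reverseRecOn with
  | nil => simp
  | append_singleton zs z ih =>
    rw [← List.append_assoc, rfind_snoc]
    by_cases h : z = c
    · rw [if_pos h]
      have h1 := (rfind_bounds xs c).2
      have : (xs.length : Int) ≤ ((xs ++ zs).length : Int) := by simp
      omega
    · rw [if_neg h]; exact ih

-- take (l+1) = take l ++ [cs[l]]
theorem take_succ_snoc (cs : List Char) (n : Nat) (h : n < cs.length) :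
    cs.take (n + 1) = cs.take n ++ [cs[n]] := by
  rw [List.take_add_one]
  simp [List.getElem?_eq_getElem h]

-- the A-side invariant: the backward scan computes rfind on the prefix plus the step count
theorem scanBackA_eq (cs : List Char) (c : Char) :
    ∀ (l : Int) (ans : Int), -1 ≤ l → l < (cs.length : Int) →
      scanBackA cs (some c) l ans =
        (PySem.Chars.rfind (cs.take (l + 1).toNat) [c],
         ans + (l - PySem.Chars.rfind (cs.take (l + 1).toNat) [c])) := by
  intro l
  induction l using Int.induction_on with
  | zero =>
    intro ans _ _
    rw [scanBackA]
    have h0 : PySem.List.pyGet? cs (0 : Int) = cs[0]? := by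
      simpa using PySem.List.pyGet?_natCast cs 0
    have hlt : 0 < cs.length := by omega
    by_cases hc : cs[0] = c
    · have : PySem.List.pyGet? cs (0 : Int) = some c := by
        rw [h0, List.getElem?_eq_getElem hlt, hc]
      simp only [this]
      have htake : cs.take 1 = [] ++ [cs[0]] := by
        simpa using take_succ_snoc cs 0 hlt
      simp [htake, rfind_singleton, hc]
    · have hsome : PySem.List.pyGet? cs (0 : Int) ≠ some c := by
        rw [h0, List.getElem?_eq_getElem hlt]
        simpa using hc
      rw [if_pos (⟨le_refl (0 : Int), hsome⟩ : (0:Int) ≤ 0 ∧ PySem.List.pyGet? cs 0 ≠ some c)]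
      rw [scanBackA]
      rw [if_neg (show ¬((0:Int) ≤ (0:Int) - 1 ∧ PySem.List.pyGet? cs ((0:Int) - 1) ≠ some c) from
        fun h => absurd h.1 (by norm_num))]
      have htake : cs.take 1 = [] ++ [cs[0]] := by
        simpa using take_succ_snoc cs 0 hlt
      simp [htake, rfind_singleton, hc]
  | pred i ih =>
    intro ans h1 _
    have : (i : Int) = 0 := by omega
    rw [scanBackA]
    have hneg : ¬(0 ≤ (-(i : Int) - 1) ∧ PySem.List.pyGet? cs (-(i:Int) - 1) ≠ some c) := by omega
    simp only [hneg, if_false]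
    have : (-(i : Int) - 1 + 1).toNat = 0 := by omega
    rw [this]
    simp [rfind_nil]
    omega
  | succ i ih =>
    intro ans _ hlen
    have hlt : i + 1 < cs.length := by exact_mod_cast hlen
    have hidx : PySem.List.pyGet? cs ((i : Int) + 1) = some cs[i + 1] := by
      rw [show ((i : Int) + 1) = ((i + 1 : Nat) : Int) by push_cast; ring,
        PySem.List.pyGet?_natCast, List.getElem?_eq_getElem hlt]
    have htake : cs.take (((i : Int) + 1 + 1)).toNat = cs.take (i + 1) ++ [cs[i + 1]] := by
      rw [show (((i : Int) + 1 + 1)).toNat = i + 1 + 1 by omega]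
      exact take_succ_snoc cs (i + 1) hlt
    rw [scanBackA]
    by_cases hc : cs[i + 1] = c
    · have : ¬(0 ≤ (i : Int) + 1 ∧ PySem.List.pyGet? cs ((i:Int) + 1) ≠ some c) := by
        simp [hidx, hc]
      simp only [this, if_false]
      rw [htake, rfind_snoc, if_pos hc]
      simp [List.length_take]
      omega
    · have hcond : (0 ≤ (i : Int) + 1 ∧ PySem.List.pyGet? cs ((i:Int) + 1) ≠ some c) := by
        constructor
        · omega
        · simp [hidx, hc]
      rw [if_pos hcond, show (i : Int) + 1 - 1 = (i : Int) by ring]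
      have hrec := ih (ans + 1) (by omega) (by omega)
      rw [hrec, htake, rfind_snoc, if_neg hc,
        show ((i : Int) + 1).toNat = i + 1 by omega]
      simp only [Prod.mk.injEq]
      exact ⟨trivial, by ring⟩

-- proof-side name for what B's best accumulator must equal on a processed prefix
def bestOf (c0 c1 : Char) (xs : List Char) : Int :=
  if PySem.Chars.rfind xs [c1] < 0 then -1
  else PySem.Chars.rfind (xs.take (PySem.Chars.rfind xs [c1]).toNat) [c0]

-- the B-side invariant: the forward fold computes (rfind for c0, bestOf)
theorem foldB_inv (b : String) (c0 c1 : Char)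
    (h0 : PySem.Str.pyGet? b 0 = some c0) (h1 : PySem.Str.pyGet? b 1 = some c1)
    (xs : List Char) :
    (PySem.List.enumerate xs 0).foldl (stepB b) (-1, -1) =
      (PySem.Chars.rfind xs [c0], bestOf c0 c1 xs) := by
  induction xs using List.reverseRecOn with
  | nil => simp [PySem.List.enumerate_nil, rfind_nil, bestOf]
  | append_singleton ys y ih =>
    rw [PySem.List.enumerate_append, List.foldl_append, ih]
    simp only [PySem.List.enumerate_cons, PySem.List.enumerate_nil, List.foldl_cons,
      List.foldl_nil, stepB, h0, h1, zero_add]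
    set L := PySem.Chars.rfind ys [c0] with hL
    have hLb := rfind_bounds ys c0
    have hBle : bestOf c0 c1 ys ≤ L := by
      unfold bestOf
      split
      · omega
      · have hi := rfind_bounds ys c1
        have : ys = ys.take (PySem.Chars.rfind ys [c1]).toNat ++
            ys.drop (PySem.Chars.rfind ys [c1]).toNat := (List.take_append_drop _ _).symm
        calc PySem.Chars.rfind (ys.take (PySem.Chars.rfind ys [c1]).toNat) [c0]
            ≤ PySem.Chars.rfind (ys.take (PySem.Chars.rfind ys [c1]).toNat ++
                ys.drop (PySem.Chars.rfind ys [c1]).toNat) [c0] := rfind_append_le _ _ _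
          _ = L := by rw [← this]
    have hbest : bestOf c0 c1 (ys ++ [y]) =
        if y = c1 then L else bestOf c0 c1 ys := by
      unfold bestOf
      rw [rfind_snoc]
      by_cases hy : y = c1
      · rw [if_pos hy, if_pos hy, if_neg (by omega : ¬ (ys.length : Int) < 0)]
        rw [show ((ys.length : Int)).toNat = ys.length by omega]
        rw [List.take_left]
      · rw [if_neg hy, if_neg hy]
        split
        · rfl
        · have hi := rfind_bounds ys c1
          rw [List.take_append_of_le_length (by omega)]
    rw [hbest]
    have hlast : PySem.Chars.rfind (ys ++ [y]) [c0] =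
        if y = c0 then (ys.length : Int) else L := rfind_snoc ys y c0
    by_cases hy : y = c1
    · have hc : (some c1 = some y) := by rw [hy]
      simp only [hc, true_and, if_pos hy]
      by_cases hgt : L > bestOf c0 c1 ys
      · simp [hgt, hlast, eq_comm]
      · have : L = bestOf c0 c1 ys := by omega
        simp [hlast, this, eq_comm]
    · have hc : ¬ (some c1 = some y) := by simp; exact fun h => hy h.symm
      simp only [hc, false_and, if_false, if_neg hy, hlast]
      by_cases hy0 : y = c0
      · have : (some c0 = some y) := by rw [hy0]
        simp [this, hy0]
      · have : ¬ (some c0 = some y) := by simp; exact fun h => hy0 h.symm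
        simp [this, hy0]

-- ===== VERDICT (by name: the statement is the Claim_ definition above) =====
theorem result_spec : Claim_equal_result := by
  intro a b _ hpre
  unfold Spec_result
  rcases hpre with hA | hpre
  · subst hA
    have h : ("" : String).toList = [] := rfl
    rw [result, result_alt]
    rw [h]
    rw [scanBackA]
    norm_num
  · -- 2 ≤ b.length: extract b[0], b[1]
    have hblen : 2 ≤ b.toList.length := by
      rw [String.length_toList]; exact hpre
    have hb1 : ∃ c1, PySem.Str.pyGet? b 1 = some c1 := by
      rw [show (1 : Int) = ((1 : Nat) : Int) from rfl, PySem.Str.pyGet?_natCast]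
      exact ⟨b.toList[1]'(by omega), List.getElem?_eq_getElem (by omega)⟩
    have hb0 : ∃ c0, PySem.Str.pyGet? b 0 = some c0 := by
      rw [show (0 : Int) = ((0 : Nat) : Int) from rfl, PySem.Str.pyGet?_natCast]
      exact ⟨b.toList[0]'(by omega), List.getElem?_eq_getElem (by omega)⟩
    obtain ⟨c1, h1⟩ := hb1
    obtain ⟨c0, h0⟩ := hb0
    rw [result, result_alt, h1, h0]
    set cs := a.toList with hcs
    rw [foldB_inv b c0 c1 h0 h1 cs]
    cases hnil : cs with
    | nil =>
      rw [scanBackA]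
      norm_num [bestOf, rfind_nil, PySem.Str.len, hcs.symm.trans hnil]
    | cons z zs =>
      have hlen0 : 0 < cs.length := by rw [hnil]; simp
      rw [← hnil]
      have hL1 := scanBackA_eq cs c1 ((cs.length : Int) - 1) 0 (by omega) (by omega)
      have htakeAll : cs.take (((cs.length : Int) - 1 + 1)).toNat = cs := by
        rw [show (((cs.length : Int) - 1 + 1)).toNat = cs.length by omega]
        exact List.take_length
      rw [htakeAll] at hL1
      set i := PySem.Chars.rfind cs [c1] with hi
      have hib := rfind_bounds cs c1
      rw [← hi] at hib
      simp only [hL1]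
      by_cases hi0 : i < 0
      · have hbo : bestOf c0 c1 cs = -1 := by unfold bestOf; rw [← hi, if_pos hi0]
        simp [hi0, hbo]
      · have hbo : bestOf c0 c1 cs =
            PySem.Chars.rfind (cs.take i.toNat) [c0] := by
          unfold bestOf; rw [← hi, if_neg hi0]
        have hL2 := scanBackA_eq cs c0 (i - 1) (0 + ((cs.length : Int) - 1 - i))
          (by omega) (by omega)
        have ht2 : ((i - 1 + 1)).toNat = i.toNat := by omega
        rw [ht2] at hL2
        set j := PySem.Chars.rfind (cs.take i.toNat) [c0] with hj
        have hjb := rfind_bounds (cs.take i.toNat) c0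
        rw [← hj] at hjb
        simp only [if_neg hi0, hL2, hbo]
        by_cases hj0 : j < 0
        · have : j = -1 := by omega
          simp [this]
        · have hjne : ¬ j = -1 := by omega
          simp only [if_neg hj0, if_neg hjne]
          have hlenEq : PySem.Str.len a = (cs.length : Int) := by
            rw [PySem.Str.len, hcs]
          rw [hlenEq]
          ring
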